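-- pv_equiv track=rewrite | github.com/UW-Stout-ML/MusicGen | functions.py | combine_time_steps
-- ===== SOURCE A (Python) =====
-- def combine_time_steps(sentence):
--   """Combine consecutive time steps in the sentence.
--
--   Parameters
--   ----------
--   sentence : list of str
--     The sentence to combine time steps in.
--
--   Returns
--   -------
--   combined_sentence : list of str
--     The sentence with combined time steps.
--   """
--
--   combined_sentence = []
--   time_step_count = 0
--
--   for token in sentence:
--     if token == 'ts':
--       time_step_count += 1
--       if time_step_count == 100:
--         combined_sentence.append(f"ts({time_step_count})")
--         time_step_count = 0
--     else:
--       if time_step_count > 0: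
--         combined_sentence.append(f"ts({time_step_count})")
--         time_step_count = 0
--       combined_sentence.append(token)
--
--   # If there are remaining time steps at the end, add them
--   if time_step_count > 0:
--     combined_sentence.append(f"ts({time_step_count})")
--
--   return combined_sentence
-- ===== SOURCE B (Python) =====
-- def combine_time_steps(sentence):
--   """Combine consecutive time steps in the sentence (run-splitting version)."""
--   combined_sentence = []
--   i = 0
--   n = len(sentence)
--   while i < n:
--     tok = sentence[i]
--     j = i
--     while j < n and sentence[j] == tok:
--       j += 1
--     run = j - i
--     if tok == 'ts':
--       combined_sentence.extend(["ts(100)"] * (run // 100))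
--       if run % 100 != 0:
--         combined_sentence.append(f"ts({run % 100})")
--     else:
--       combined_sentence.extend(sentence[i:j])
--     i = j
--   return combined_sentence
-- ===== Notes on version B (the rewrite author's own statement) =====
-- stated objective: alternative
-- what changed: B splits the sentence into maximal runs of equal tokens and converts each 'ts' run by arithmetic (run//100 full markers plus a remainder marker) instead of A's token-by-token counter with in-loop emission and a final flush.
import Mathlib
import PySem

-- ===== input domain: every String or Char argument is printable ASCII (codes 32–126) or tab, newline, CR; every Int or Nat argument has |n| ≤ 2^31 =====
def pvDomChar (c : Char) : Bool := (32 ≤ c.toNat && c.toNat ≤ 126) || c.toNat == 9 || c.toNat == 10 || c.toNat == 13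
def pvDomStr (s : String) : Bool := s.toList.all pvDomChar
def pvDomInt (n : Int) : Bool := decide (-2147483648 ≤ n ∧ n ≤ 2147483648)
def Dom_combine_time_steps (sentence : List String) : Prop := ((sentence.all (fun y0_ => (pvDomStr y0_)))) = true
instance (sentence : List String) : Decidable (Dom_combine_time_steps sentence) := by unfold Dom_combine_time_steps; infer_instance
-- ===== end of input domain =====

-- B replaces A's token-by-token counter by run-splitting with 100-cap arithmetic (alternative decomposition, same cost).

-- ===== PORT A =====
-- A's loop body, lifted out so the foldl is the loop over the SAME state (accumulated list, time_step_count).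
def ctsStep (st : List String × Int) (token : String) : List String × Int :=
  if token = "ts" then
    let c := st.2 + 1
    if c = 100 then (st.1 ++ ["ts(" ++ PySem.Int.toStr c ++ ")"], 0)
    else (st.1, c)
  else
    let acc := if st.2 > 0 then st.1 ++ ["ts(" ++ PySem.Int.toStr st.2 ++ ")"] else st.1
    (acc ++ [token], 0)

def combine_time_steps (sentence : List String) : List String :=
  let st := sentence.foldl ctsStep ([], 0)
  if st.2 > 0 then st.1 ++ ["ts(" ++ PySem.Int.toStr st.2 ++ ")"] else st.1

-- ===== PORT B =====
-- B's outer while loop walks maximal runs of equal tokens (the inner index scan = takeWhile/dropWhile).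
def combine_time_steps_alt (sentence : List String) : List String :=
  match sentence with
  | [] => []
  | tok :: rest =>
    let run := rest.takeWhile (· == tok)
    let rest' := rest.dropWhile (· == tok)
    let n : Int := ((run.length + 1 : Nat) : Int)
    (if tok = "ts" then
      List.replicate (PySem.Int.floordiv n 100).toNat "ts(100)"
        ++ (if PySem.Int.mod n 100 ≠ 0 then ["ts(" ++ PySem.Int.toStr (PySem.Int.mod n 100) ++ ")"] else [])
     else tok :: run)
    ++ combine_time_steps_alt rest'
termination_by sentence.length
decreasing_by
  simp only [List.length_cons]
  exact Nat.lt_succ_of_le (List.length_dropWhile_le _ _)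

-- ===== PRECONDITION & SPEC =====
def Spec_combine_time_steps (sentence : List String) (out : List String) : Prop := out = combine_time_steps_alt sentence
instance (sentence : List String) (out : List String) : Decidable (Spec_combine_time_steps sentence out) := by unfold Spec_combine_time_steps; infer_instance

-- ===== CLAIM (what is proved, stated in full; the proofs are below) =====
def Claim_equal_combine_time_steps : Prop := ∀ (sentence : List String), Dom_combine_time_steps sentence → Spec_combine_time_steps sentence (combine_time_steps sentence)

-- ===== LEMMAS AND PROOFS =====

/-- The marker string `f"ts({c})"`. -/
def tsM (c : Int) : String := "ts(" ++ PySem.Int.toStr c ++ ")"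

/-- What A appends when a non-ts token (or the end) flushes the counter. -/
def ctsFlush (c : Int) : List String := if c > 0 then [tsM c] else []

/-- A's final flush. -/
def ctsFinish (st : List String × Int) : List String :=
  if st.2 > 0 then st.1 ++ [tsM st.2] else st.1

/-- What one step of A appends. -/
def ctsEmit (token : String) (c : Int) : List String :=
  if token = "ts" then (if c + 1 = 100 then [tsM (c + 1)] else []) else ctsFlush c ++ [token]

/-- A's counter after one step. -/
def ctsNext (token : String) (c : Int) : Int :=
  if token = "ts" then (if c + 1 = 100 then 0 else c + 1) else 0

theorem cts_eq_finish (l : List String) :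
    combine_time_steps l = ctsFinish (l.foldl ctsStep ([], 0)) := rfl

theorem ctsStep_eq (st : List String × Int) (t : String) :
    ctsStep st t = (st.1 ++ ctsEmit t st.2, ctsNext t st.2) := by
  simp only [ctsStep, ctsEmit, ctsNext, ctsFlush, tsM]
  split_ifs <;> simp

theorem ctsFinish_append (a p : List String) (c : Int) :
    ctsFinish (a ++ p, c) = a ++ ctsFinish (p, c) := by
  simp only [ctsFinish]
  split_ifs <;> simp

/-- Accumulator extraction for A's fold. -/
theorem foldl_extract (l : List String) (acc : List String) (c : Int) :
    l.foldl ctsStep (acc, c)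
      = (acc ++ (l.foldl ctsStep ([], c)).1, (l.foldl ctsStep ([], c)).2) := by
  induction l generalizing acc c with
  | nil => simp
  | cons t l ih =>
    simp only [List.foldl_cons, ctsStep_eq, List.nil_append]
    rw [ih (acc ++ ctsEmit t c), ih (ctsEmit t c)]
    simp

/-- A run of k "ts" tokens from counter c < 100 emits (c+k)/100 full markers. -/
theorem foldl_ts_run (k : Nat) : ∀ (c : Nat) (acc : List String), c < 100 →
    (List.replicate k "ts").foldl ctsStep (acc, (c : Int))
      = (acc ++ List.replicate ((c + k) / 100) (tsM 100), (((c + k) % 100 : Nat) : Int)) := by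
  induction k with
  | zero =>
    intro c acc hc
    simp [Nat.mod_eq_of_lt hc, Nat.div_eq_of_lt hc]
  | succ k ih =>
    intro c acc hc
    rw [List.replicate_succ, List.foldl_cons, ctsStep_eq]
    simp only [ctsEmit, ctsNext]
    by_cases h99 : c = 99
    · subst h99
      have h : ((99 : Nat) : Int) + 1 = 100 := by norm_num
      rw [if_pos h, if_pos h, h]
      simp only [if_true]
      have h0 : (0 : Int) = ((0 : Nat) : Int) := rfl
      rw [h0, ih 0 _ (by omega)]
      have hx : (99 + (k + 1)) / 100 = (0 + k) / 100 + 1 := by omega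
      have hy : (99 + (k + 1)) % 100 = (0 + k) % 100 := by omega
      rw [hx, hy, List.replicate_succ]
      simp
    · have h : ¬ ((c : Nat) : Int) + 1 = 100 := by omega
      rw [if_neg h, if_neg h]
      simp only [if_true]
      have hcast : ((c : Nat) : Int) + 1 = ((c + 1 : Nat) : Int) := by push_cast; ring
      have hx : c + 1 + k = c + (k + 1) := by omega
      rw [hcast, ih (c + 1) _ (by omega), hx]
      simp

/-- A run of tokens ≠ "ts" from counter 0 is copied verbatim. -/
theorem foldl_nonts_run (l : List String) (acc : List String)
    (h : ∀ t ∈ l, t ≠ "ts") :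
    l.foldl ctsStep (acc, 0) = (acc ++ l, 0) := by
  induction l generalizing acc with
  | nil => simp
  | cons t l ih =>
    have ht : t ≠ "ts" := h t (by simp)
    rw [List.foldl_cons, ctsStep_eq]
    simp only [ctsEmit, ctsNext, if_neg ht, ctsFlush]
    norm_num
    rw [ih (acc ++ [t]) (fun u hu => h u (by simp [hu]))]
    simp

/-- Finishing A's fold from counter 0 is the fresh run of A prefixed by the accumulator. -/
theorem finish_foldl_zero (m : List String) (acc : List String) :
    ctsFinish (m.foldl ctsStep (acc, 0)) = acc ++ combine_time_steps m := by
  rw [foldl_extract m acc 0, ctsFinish_append, cts_eq_finish]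

/-- Finishing A's fold from counter c < 100, when the remaining list is empty or
    starts with a non-ts token, flushes c and then restarts fresh. -/
theorem finish_foldl (l : List String) (acc : List String) (c : Nat) (_hc : c < 100)
    (hl : l = [] ∨ ∃ u r, l = u :: r ∧ u ≠ "ts") :
    ctsFinish (l.foldl ctsStep (acc, (c : Int)))
      = acc ++ ctsFlush (c : Int) ++ combine_time_steps l := by
  rcases hl with rfl | ⟨u, r, rfl, hu⟩
  · simp [combine_time_steps, ctsFinish, ctsFlush, List.foldl]
    split_ifs <;> simp
  · rw [List.foldl_cons, ctsStep_eq, cts_eq_finish, List.foldl_cons, ctsStep_eq]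
    simp only [ctsEmit, ctsNext, if_neg hu, List.nil_append]
    rw [finish_foldl_zero r (acc ++ (ctsFlush ↑c ++ [u]))]
    rw [finish_foldl_zero r (ctsFlush 0 ++ [u]), cts_eq_finish]
    simp [ctsFlush]

theorem dropWhile_shape (p : String → Bool) (l : List String) :
    l.dropWhile p = [] ∨ ∃ u r, l.dropWhile p = u :: r ∧ p u = false := by
  induction l with
  | nil => simp
  | cons t l ih =>
    by_cases h : p t
    · simpa [h] using ih
    · right
      exact ⟨t, l, by simp [h], by simp [h]⟩

theorem cts_main : ∀ (l : List String), combine_time_steps l = combine_time_steps_alt l := by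
  intro l
  induction hn : l.length using Nat.strong_induction_on generalizing l with
  | _ n ih =>
  match l with
  | [] => simp [combine_time_steps, combine_time_steps_alt]
  | tok :: rest =>
    subst hn
    have hsplit : rest = rest.takeWhile (· == tok) ++ rest.dropWhile (· == tok) :=
      (List.takeWhile_append_dropWhile).symm
    set run := rest.takeWhile (· == tok) with hrun
    set rest' := rest.dropWhile (· == tok) with hrest'
    have hlen : rest'.length < (tok :: rest).length := by
      simp only [List.length_cons]
      exact Nat.lt_succ_of_le (List.length_dropWhile_le _ _)
    have hrunmem : ∀ x ∈ run, x = tok := by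
      intro x hx
      have := List.mem_takeWhile_imp hx
      simpa using this
    have hih : combine_time_steps rest' = combine_time_steps_alt rest' :=
      ih rest'.length hlen rest' rfl
    have hshape : rest' = [] ∨ ∃ u r, rest' = u :: r ∧ u ≠ tok := by
      rcases dropWhile_shape (· == tok) rest with h | ⟨u, r, h, hu⟩
      · left; exact h
      · right; exact ⟨u, r, h, by simpa using hu⟩
    rw [cts_eq_finish]
    by_cases htok : tok = "ts"
    · -- ts run
      subst htok
      have hrep : run = List.replicate run.length "ts" := by
        apply List.eq_replicate_of_mem
        intro x hx; exact hrunmem x hx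
      have hshape' : rest' = [] ∨ ∃ u r, rest' = u :: r ∧ u ≠ "ts" := hshape
      have hl : ("ts" :: rest) = List.replicate (run.length + 1) "ts" ++ rest' := by
        rw [List.replicate_succ, List.cons_append]
        congr 1
        rw [← hrep]
        exact hsplit
      conv_lhs => rw [hl, List.foldl_append]
      have h100 : (0 : Int) = ((0 : Nat) : Int) := rfl
      rw [h100, foldl_ts_run (run.length + 1) 0 [] (by omega)]
      have hmodlt : (0 + (run.length + 1)) % 100 < 100 := Nat.mod_lt _ (by omega)
      rw [finish_foldl rest' _ _ hmodlt hshape', hih]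
      -- now identify with B's branch
      show _ = combine_time_steps_alt ("ts" :: rest)
      rw [combine_time_steps_alt]
      simp only [← hrun, ← hrest', if_true]
      have hk : (0 + (run.length + 1)) = run.length + 1 := by omega
      rw [hk]
      have hfd : PySem.Int.floordiv ((run.length + 1 : Nat) : Int) 100
          = (((run.length + 1) / 100 : Nat) : Int) := by
        exact_mod_cast PySem.Int.floordiv_natCast (run.length + 1) 100
      have hmd : PySem.Int.mod ((run.length + 1 : Nat) : Int) 100
          = (((run.length + 1) % 100 : Nat) : Int) := by
        exact_mod_cast PySem.Int.mod_natCast (run.length + 1) 100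
      rw [hfd, hmd]
      have hts100 : "ts(100)" = tsM 100 := by decide
      rw [Int.toNat_natCast, hts100]
      congr 1
      simp only [ctsFlush, tsM]
      by_cases hz : (run.length + 1) % 100 = 0
      · simp [hz]
      · have h1 : (0 : Int) < (((run.length + 1) % 100 : Nat) : Int) := by omega
        have h2 : ((((run.length + 1) % 100 : Nat)) : Int) ≠ 0 := by omega
        rw [if_pos h1, if_pos h2]
        simp
    · -- non-ts run
      have hall : ∀ t ∈ tok :: run, t ≠ "ts" := by
        intro t ht
        rcases List.mem_cons.mp ht with rfl | ht'
        · exact htok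
        · rw [hrunmem t ht']; exact htok
      have hl : (tok :: rest) = (tok :: run) ++ rest' := by
        rw [List.cons_append]; congr 1
      conv_lhs => rw [hl, List.foldl_append]
      rw [foldl_nonts_run (tok :: run) [] hall, List.nil_append]
      rw [finish_foldl_zero rest' (tok :: run), hih]
      show _ = combine_time_steps_alt (tok :: rest)
      rw [combine_time_steps_alt]
      simp only [← hrun, ← hrest', if_neg htok]

-- ===== VERDICT (by name: the statement is the Claim_ definition above) =====
theorem combine_time_steps_spec : Claim_equal_combine_time_steps := by
  intro sentence _
  unfold Spec_combine_time_steps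
  exact cts_main sentence
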